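-- pv_equiv track=rewrite | github.com/Saniya-22/centralized_contract_mnagement_suite | scripts/run_test_queries.py | _path_summary
-- ===== SOURCE A (Python) =====
-- def _path_summary(agent_path):
--     if not agent_path:
--         return "unknown"
--     if any("clause_lookup" in p for p in agent_path):
--         return "clause_lookup"
--     if any("Clarifier:" in p for p in agent_path):
--         return "clarifier"
--     if any("regulation_search" in p for p in agent_path):
--         return "regulation_search"
--     return "other"
-- ===== SOURCE B (Python) =====
-- _LABELS = ("clause_lookup", "clarifier", "regulation_search", "other")
--
-- def _classify(p):
--     if "clause_lookup" in p:
--         return 0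
--     if "Clarifier:" in p:
--         return 1
--     if "regulation_search" in p:
--         return 2
--     return 3
--
-- def _path_summary(agent_path):
--     if not agent_path:
--         return "unknown"
--     return _LABELS[min(map(_classify, agent_path))]
-- ===== Notes on version B (the rewrite author's own statement) =====
-- stated objective: alternative
-- what changed: Instead of three staged whole-list substring scans, B classifies each element once into a numeric priority rank, takes the minimum rank over the list, and returns the corresponding entry of a label table.
import Mathlib
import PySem

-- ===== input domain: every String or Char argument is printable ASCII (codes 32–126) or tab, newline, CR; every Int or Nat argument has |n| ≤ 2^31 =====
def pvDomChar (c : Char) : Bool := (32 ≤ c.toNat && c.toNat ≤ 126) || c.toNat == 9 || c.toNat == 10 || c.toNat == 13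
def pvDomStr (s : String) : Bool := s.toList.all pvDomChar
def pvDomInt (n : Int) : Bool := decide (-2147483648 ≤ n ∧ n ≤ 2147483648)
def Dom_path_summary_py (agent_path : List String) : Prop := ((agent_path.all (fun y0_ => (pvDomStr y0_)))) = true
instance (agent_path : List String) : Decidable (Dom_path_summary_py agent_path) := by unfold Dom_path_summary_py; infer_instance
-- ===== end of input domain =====

-- B classifies each element into a numeric priority rank, takes the minimum rank, and indexes a label table (alternative decomposition, same cost).

-- ===== PORT A =====
def path_summary_py (agent_path : List String) : String :=
  if agent_path = [] then "unknown"
  else if agent_path.any (fun p => PySem.Str.isIn "clause_lookup" p) then "clause_lookup"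
  else if agent_path.any (fun p => PySem.Str.isIn "Clarifier:" p) then "clarifier"
  else if agent_path.any (fun p => PySem.Str.isIn "regulation_search" p) then "regulation_search"
  else "other"

-- ===== PORT B =====
-- _LABELS[i] for the fixed 4-tuple literal, ported as a match on the index
def pathLabel (i : Nat) : String :=
  match i with
  | 0 => "clause_lookup"
  | 1 => "clarifier"
  | 2 => "regulation_search"
  | _ => "other"

-- _classify
def pathClassify (p : String) : Nat :=
  if PySem.Str.isIn "clause_lookup" p then 0
  else if PySem.Str.isIn "Clarifier:" p then 1
  else if PySem.Str.isIn "regulation_search" p then 2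
  else 3

-- min(map(_classify, agent_path)) over a nonempty list, as a fold of min
def path_summary_py_alt (agent_path : List String) : String :=
  if agent_path = [] then "unknown"
  else pathLabel ((agent_path.map pathClassify).foldl min 3)

-- ===== PRECONDITION & SPEC =====
def Spec_path_summary_py (agent_path : List String) (out : String) : Prop := out = path_summary_py_alt agent_path
instance (agent_path : List String) (out : String) : Decidable (Spec_path_summary_py agent_path out) := by unfold Spec_path_summary_py; infer_instance

-- ===== CLAIM (what is proved, stated in full; the proofs are below) =====
def Claim_equal_path_summary_py : Prop := ∀ (agent_path : List String), Dom_path_summary_py agent_path → Spec_path_summary_py agent_path (path_summary_py agent_path)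

-- ===== LEMMAS AND PROOFS =====

-- the minimum rank of a list, characterised by the three `any` scans of A
def rankOf (xs : List String) : Nat :=
  if xs.any (fun p => PySem.Str.isIn "clause_lookup" p) then 0
  else if xs.any (fun p => PySem.Str.isIn "Clarifier:" p) then 1
  else if xs.any (fun p => PySem.Str.isIn "regulation_search" p) then 2
  else 3

lemma minIf (b1 b2 b3 a1 a2 a3 : Bool) :
    (if (b1 || a1) then 0 else if (b2 || a2) then 1 else if (b3 || a3) then 2 else 3)
      = min (if b1 then (0:Nat) else if b2 then 1 else if b3 then 2 else 3)
            (if a1 then 0 else if a2 then 1 else if a3 then 2 else 3) := by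
  revert b1 b2 b3 a1 a2 a3
  decide

lemma rankOf_cons (x : String) (xs : List String) :
    rankOf (x :: xs) = min (pathClassify x) (rankOf xs) := by
  unfold rankOf pathClassify
  simp only [List.any_cons]
  exact minIf _ _ _ _ _ _

lemma foldl_min_rank (xs : List String) (a : Nat) (ha : a ≤ 3) :
    (xs.map pathClassify).foldl min a = min a (rankOf xs) := by
  induction xs generalizing a with
  | nil => simp [rankOf]; omega
  | cons x xs ih =>
    have hc : pathClassify x ≤ 3 := by unfold pathClassify; split_ifs <;> omega
    rw [List.map_cons, List.foldl_cons, ih (min a (pathClassify x)) (by omega),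
        rankOf_cons]
    omega

lemma minRank_eq (xs : List String) :
    (xs.map pathClassify).foldl min 3 = rankOf xs := by
  have h3 : rankOf xs ≤ 3 := by unfold rankOf; split_ifs <;> omega
  rw [foldl_min_rank xs 3 (le_refl 3)]
  omega

-- ===== VERDICT (by name: the statement is the Claim_ definition above) =====
theorem path_summary_py_spec : Claim_equal_path_summary_py := by
  intro agent_path _
  unfold Spec_path_summary_py path_summary_py path_summary_py_alt
  rw [minRank_eq]
  unfold rankOf pathLabel
  split_ifs <;> rfl
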